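-- pv_equiv track=rewrite | github.com/2f42/adventofcode2020 | day12/day12.py | modify_waypoint
-- ===== SOURCE A (Python) =====
-- def modify_waypoint(waypoint, action, amount):
--     if action == "N":
--         waypoint[1] += amount
--     elif action == "S":
--         waypoint[1] -= amount
--     elif action == "E":
--         waypoint[0] += amount
--     elif action == "W":
--         waypoint[0] -= amount
--     elif action == "L":
--         for i in range(amount//90):
--             waypoint = [-waypoint[1], waypoint[0]]
--     elif action == "R":
--         for i in range(amount//90):
--             waypoint = [waypoint[1], -waypoint[0]]
--     return waypoint
-- ===== SOURCE B (Python) =====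
-- def modify_waypoint(waypoint, action, amount):
--     if action in ("N", "S"):
--         waypoint[1] += amount if action == "N" else -amount
--     elif action in ("E", "W"):
--         waypoint[0] += amount if action == "E" else -amount
--     elif action in ("L", "R"):
--         k = amount // 90
--         if k > 0:
--             n = k % 4
--             if action == "R":
--                 n = (-n) % 4
--             x, y = waypoint[0], waypoint[1]
--             return [[x, y], [-y, x], [-x, -y], [y, -x]][n]
--     return waypoint
-- ===== Notes on version B (the rewrite author's own statement) =====
-- stated objective: simpler
-- what changed: Rotation loops (amount//90 repetitions of a 90-degree step) are replaced by a closed form: one modular reduction n = (amount//90) % 4 (mirrored for R) selecting directly among the four possible rotated waypoints.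
-- outside the precondition, e.g. on modify_waypoint([1], 'N', 5): A raises IndexError, B raises IndexError
import Mathlib
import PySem

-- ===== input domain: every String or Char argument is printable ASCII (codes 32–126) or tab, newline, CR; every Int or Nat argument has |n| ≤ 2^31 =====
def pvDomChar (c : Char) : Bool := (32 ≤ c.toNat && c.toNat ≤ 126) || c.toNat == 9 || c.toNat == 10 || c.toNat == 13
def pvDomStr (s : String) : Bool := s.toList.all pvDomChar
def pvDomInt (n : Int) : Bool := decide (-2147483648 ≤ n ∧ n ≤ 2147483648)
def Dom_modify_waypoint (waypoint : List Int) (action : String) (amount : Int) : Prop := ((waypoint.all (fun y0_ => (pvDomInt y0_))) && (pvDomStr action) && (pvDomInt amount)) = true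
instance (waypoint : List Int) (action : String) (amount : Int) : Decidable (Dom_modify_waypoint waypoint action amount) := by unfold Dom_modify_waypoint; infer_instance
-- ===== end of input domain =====

-- B replaces A's step-by-step rotation loops by a closed form selecting among the four
-- possible rotated waypoints via (amount//90) % 4; objective: simpler.

-- ===== PORT A =====
def modify_waypoint (waypoint : List Int) (action : String) (amount : Int) : List Int :=
  if action = "N" then
    PySem.List.pySetD waypoint 1 (PySem.List.pyGetD waypoint 1 0 + amount)
  else if action = "S" then
    PySem.List.pySetD waypoint 1 (PySem.List.pyGetD waypoint 1 0 - amount)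
  else if action = "E" then
    PySem.List.pySetD waypoint 0 (PySem.List.pyGetD waypoint 0 0 + amount)
  else if action = "W" then
    PySem.List.pySetD waypoint 0 (PySem.List.pyGetD waypoint 0 0 - amount)
  else if action = "L" then
    (PySem.List.pyRange 0 (PySem.Int.floordiv amount 90) 1).foldl
      (fun wp _ => [-(PySem.List.pyGetD wp 1 0), PySem.List.pyGetD wp 0 0]) waypoint
  else if action = "R" then
    (PySem.List.pyRange 0 (PySem.Int.floordiv amount 90) 1).foldl
      (fun wp _ => [PySem.List.pyGetD wp 1 0, -(PySem.List.pyGetD wp 0 0)]) waypoint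
  else
    waypoint

-- ===== PORT B =====
def modify_waypoint_alt (waypoint : List Int) (action : String) (amount : Int) : List Int :=
  if action = "N" ∨ action = "S" then
    PySem.List.pySetD waypoint 1
      (PySem.List.pyGetD waypoint 1 0 + (if action = "N" then amount else -amount))
  else if action = "E" ∨ action = "W" then
    PySem.List.pySetD waypoint 0
      (PySem.List.pyGetD waypoint 0 0 + (if action = "E" then amount else -amount))
  else if action = "L" ∨ action = "R" then
    let k := PySem.Int.floordiv amount 90
    if 0 < k then
      let n0 := PySem.Int.mod k 4
      let n := if action = "R" then PySem.Int.mod (-n0) 4 else n0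
      let x := PySem.List.pyGetD waypoint 0 0
      let y := PySem.List.pyGetD waypoint 1 0
      -- Source B's 4-element list literal indexed by n (n ∈ {0,1,2,3})
      if n = 0 then [x, y] else if n = 1 then [-y, x] else if n = 2 then [-x, -y] else [y, -x]
    else waypoint
  else waypoint

-- ===== PRECONDITION & SPEC =====
-- Pre_ excludes exactly the inputs where the Python raises IndexError: lists shorter
-- than the indexes the taken branch accesses (N/S need index 1, E/W index 0, and
-- L/R access indexes 0,1 iff at least one rotation step runs, i.e. amount ≥ 90).
def Pre_modify_waypoint (waypoint : List Int) (action : String) (amount : Int) : Prop :=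
  ((action = "N" ∨ action = "S") → 2 ≤ waypoint.length) ∧
  ((action = "E" ∨ action = "W") → 1 ≤ waypoint.length) ∧
  ((action = "L" ∨ action = "R") → 90 ≤ amount → 2 ≤ waypoint.length)
instance (waypoint : List Int) (action : String) (amount : Int) : Decidable (Pre_modify_waypoint waypoint action amount) := by unfold Pre_modify_waypoint; infer_instance
def pvWitness_modify_waypoint : List Int × String × Int := ([3, -2], "L", 270)

def Spec_modify_waypoint (waypoint : List Int) (action : String) (amount : Int) (out : List Int) : Prop := out = modify_waypoint_alt waypoint action amount
instance (waypoint : List Int) (action : String) (amount : Int) (out : List Int) : Decidable (Spec_modify_waypoint waypoint action amount out) := by unfold Spec_modify_waypoint; infer_instance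

-- ===== CLAIM (what is proved, stated in full; the proofs are below) =====
def Claim_equal_modify_waypoint : Prop := ∀ (waypoint : List Int) (action : String) (amount : Int), Dom_modify_waypoint waypoint action amount → Pre_modify_waypoint waypoint action amount → Spec_modify_waypoint waypoint action amount (modify_waypoint waypoint action amount)

-- ===== LEMMAS AND PROOFS =====

-- the two rotation steps, as functions of the list state
def stepL (wp : List Int) : List Int := [-(PySem.List.pyGetD wp 1 0), PySem.List.pyGetD wp 0 0]
def stepR (wp : List Int) : List Int := [PySem.List.pyGetD wp 1 0, -(PySem.List.pyGetD wp 0 0)]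

-- a fold over any list with a state-only function is iteration length-many times
theorem foldl_const_iterate {α β : Type} (f : α → α) (l : List β) (init : α) :
    l.foldl (fun s _ => f s) init = f^[l.length] init := by
  induction l generalizing init with
  | nil => rfl
  | cons b t ih => simpa [Function.iterate_succ_apply] using ih (f init)

theorem stepL_iterate (x y : Int) (m : Nat) :
    stepL^[m] [x, y] =
      if m % 4 = 0 then [x, y] else if m % 4 = 1 then [-y, x]
      else if m % 4 = 2 then [-x, -y] else [y, -x] := by
  induction m with
  | zero => simp
  | succ m ih =>
      rw [Function.iterate_succ_apply', ih]
      have h4 : m % 4 = 0 ∨ m % 4 = 1 ∨ m % 4 = 2 ∨ m % 4 = 3 := by omega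
      rcases h4 with h | h | h | h <;>
        simp [h, Nat.add_mod, stepL, PySem.List.pyGetD]

theorem stepR_iterate (x y : Int) (m : Nat) :
    stepR^[m] [x, y] =
      if m % 4 = 0 then [x, y] else if m % 4 = 3 then [-y, x]
      else if m % 4 = 2 then [-x, -y] else [y, -x] := by
  induction m with
  | zero => simp
  | succ m ih =>
      rw [Function.iterate_succ_apply', ih]
      have h4 : m % 4 = 0 ∨ m % 4 = 1 ∨ m % 4 = 2 ∨ m % 4 = 3 := by omega
      rcases h4 with h | h | h | h <;>
        simp [h, Nat.add_mod, stepR, PySem.List.pyGetD]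

-- the first rotation step depends only on pyGetD 0/1, so an arbitrary start list
-- can be replaced by the 2-list of its first two (defaulted) entries
theorem stepL_eq (wp : List Int) :
    stepL wp = stepL [PySem.List.pyGetD wp 0 0, PySem.List.pyGetD wp 1 0] := by
  simp [stepL, PySem.List.pyGetD]
theorem stepR_eq (wp : List Int) :
    stepR wp = stepR [PySem.List.pyGetD wp 0 0, PySem.List.pyGetD wp 1 0] := by
  simp [stepR, PySem.List.pyGetD]

theorem mod4_eq (k : Int) (hk : 0 < k) : PySem.Int.mod k 4 = (k.toNat % 4 : Nat) := by
  have : PySem.Int.mod k 4 = k % 4 := PySem.Int.mod_eq_emod_of_pos (a:=k) (b:=4) (by omega)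
  omega

-- ===== VERDICT (by name: the statement is the Claim_ definition above) =====
theorem modify_waypoint_spec : Claim_equal_modify_waypoint := by
  intro w a n _ _
  unfold Spec_modify_waypoint modify_waypoint modify_waypoint_alt
  by_cases hN : a = "N"
  · simp [hN]
  by_cases hS : a = "S"
  · simp [hN, hS, sub_eq_add_neg]
  by_cases hE : a = "E"
  · simp [hN, hS, hE]
  by_cases hW : a = "W"
  · simp [hN, hS, hE, hW, sub_eq_add_neg]
  by_cases hL : a = "L"
  · simp only [hL, if_true,
      if_neg (by decide : ¬("L" = "N")), if_neg (by decide : ¬("L" = "S")),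
      if_neg (by decide : ¬("L" = "E")), if_neg (by decide : ¬("L" = "W")),
      if_neg (by decide : ¬("L" = "N" ∨ "L" = "S")),
      if_neg (by decide : ¬("L" = "E" ∨ "L" = "W")), if_pos (by decide : ("L" = "L" ∨ "L" = "R"))]
    set k := PySem.Int.floordiv n 90 with hkdef
    by_cases hk : 0 < k
    · have hfold : (PySem.List.pyRange 0 k 1).foldl
          (fun wp _ => [-(PySem.List.pyGetD wp 1 0), PySem.List.pyGetD wp 0 0]) w
          = stepL^[k.toNat] [PySem.List.pyGetD w 0 0, PySem.List.pyGetD w 1 0] := by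
        have hlen : (PySem.List.pyRange 0 k 1).length = k.toNat := by
          simpa using PySem.List.length_pyRange_one 0 k
        have := foldl_const_iterate stepL (PySem.List.pyRange 0 k 1) w
        rw [show (fun (wp : List Int) (_ : Int) =>
            [-(PySem.List.pyGetD wp 1 0), PySem.List.pyGetD wp 0 0]) =
            (fun wp _ => stepL wp) from rfl] at *
        rw [this, hlen]
        have hpos : 1 ≤ k.toNat := by omega
        obtain ⟨m, hm⟩ : ∃ m, k.toNat = m + 1 := ⟨k.toNat - 1, by omega⟩
        rw [hm, Function.iterate_succ_apply, Function.iterate_succ_apply, stepL_eq]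
      rw [hfold, stepL_iterate]
      simp only [hk, if_true, mod4_eq k hk]
      have h4 : k.toNat % 4 = 0 ∨ k.toNat % 4 = 1 ∨ k.toNat % 4 = 2 ∨ k.toNat % 4 = 3 := by omega
      rcases h4 with h | h | h | h <;> simp [h]
    · have : k ≤ 0 := by omega
      rw [PySem.List.pyRange_one_eq_nil this]
      simp [hk]
  by_cases hR : a = "R"
  · simp only [hR, if_true,
      if_neg (by decide : ¬("R" = "N")), if_neg (by decide : ¬("R" = "S")),
      if_neg (by decide : ¬("R" = "E")), if_neg (by decide : ¬("R" = "W")),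
      if_neg (by decide : ¬("R" = "N" ∨ "R" = "S")),
      if_neg (by decide : ¬("R" = "E" ∨ "R" = "W")),
      if_neg (by decide : ¬("R" = "L")), if_pos (by decide : ("R" = "L" ∨ "R" = "R"))]
    set k := PySem.Int.floordiv n 90 with hkdef
    by_cases hk : 0 < k
    · have hfold : (PySem.List.pyRange 0 k 1).foldl
          (fun wp _ => [PySem.List.pyGetD wp 1 0, -(PySem.List.pyGetD wp 0 0)]) w
          = stepR^[k.toNat] [PySem.List.pyGetD w 0 0, PySem.List.pyGetD w 1 0] := by
        have hlen : (PySem.List.pyRange 0 k 1).length = k.toNat := by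
          simpa using PySem.List.length_pyRange_one 0 k
        have := foldl_const_iterate stepR (PySem.List.pyRange 0 k 1) w
        rw [show (fun (wp : List Int) (_ : Int) =>
            [PySem.List.pyGetD wp 1 0, -(PySem.List.pyGetD wp 0 0)]) =
            (fun wp _ => stepR wp) from rfl] at *
        rw [this, hlen]
        obtain ⟨m, hm⟩ : ∃ m, k.toNat = m + 1 := ⟨k.toNat - 1, by omega⟩
        rw [hm, Function.iterate_succ_apply, Function.iterate_succ_apply, stepR_eq]
      rw [hfold, stepR_iterate]
      simp only [hk, if_true, mod4_eq k hk]
      have hmm : PySem.Int.mod (-((k.toNat % 4 : Nat) : Int)) 4 = ((4 - k.toNat % 4) % 4 : Nat) := by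
        have := PySem.Int.mod_eq_emod_of_pos (a:=(-((k.toNat % 4 : Nat) : Int))) (b:=4) (by omega)
        omega
      rw [hmm]
      have h4 : k.toNat % 4 = 0 ∨ k.toNat % 4 = 1 ∨ k.toNat % 4 = 2 ∨ k.toNat % 4 = 3 := by omega
      rcases h4 with h | h | h | h <;> simp [h]
    · have : k ≤ 0 := by omega
      rw [PySem.List.pyRange_one_eq_nil this]
      simp [hk]
  · simp [hN, hS, hE, hW, hL, hR]
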